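-- pv_equiv track=rewrite | github.com/Cekec50/The-Genius-Square---Bachelor-s-Thesis-Project | Algorithms.py | heuristic_bounding_box
-- ===== SOURCE A (Python) =====
-- def heuristic_bounding_box(board):
--     empty_cells = []
--
--     for i in range(len(board)):
--         for j in range(len(board[0])):
--             if board[i][j] == 0:
--                 empty_cells.append((i, j))
--
--     # Solved if no empty cells
--     if not empty_cells:
--         return 0
--
--     min_row = max_row = empty_cells[0][0]
--     min_col = max_col = empty_cells[0][1]
--
--     # Determine the bounding box
--     for (x, y) in empty_cells:
--         if x < min_row: min_row = x
--         if x > max_row: max_row = x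
--         if y < min_col: min_col = y
--         if y > max_col: max_col = y
--
--     # Calculate the area of the bounding box
--     bounding_box_area = (max_row - min_row + 1) * (max_col - min_col + 1)
--
--     # Return the penalty based on the bounding box area and number of empty cells
--     return bounding_box_area - len(empty_cells)
-- ===== SOURCE B (Python) =====
-- def heuristic_bounding_box(board):
--     # single pass: maintain count and bounding-box extrema directly (no empty-cells list)
--     width = len(board[0]) if board else 0
--     count = 0
--     min_row = max_row = min_col = max_col = 0
--     for i, row in enumerate(board):
--         for j in range(width):
--             if row[j] == 0:
--                 if count == 0:
--                     min_row = max_row = i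
--                     min_col = max_col = j
--                 else:
--                     max_row = i
--                     min_col = min(min_col, j)
--                     max_col = max(max_col, j)
--                 count += 1
--     if count == 0:
--         return 0
--     return (max_row - min_row + 1) * (max_col - min_col + 1) - count
-- ===== Notes on version B (the rewrite author's own statement) =====
-- stated objective: simpler
-- what changed: Replaces A's two-pass design (materialize a list of empty cells, then re-scan it with four conditional min/max updates) by one pass over the board that maintains the count and the four bounding-box extrema directly, with lazy initialization on the first empty cell.
import Mathlib
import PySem

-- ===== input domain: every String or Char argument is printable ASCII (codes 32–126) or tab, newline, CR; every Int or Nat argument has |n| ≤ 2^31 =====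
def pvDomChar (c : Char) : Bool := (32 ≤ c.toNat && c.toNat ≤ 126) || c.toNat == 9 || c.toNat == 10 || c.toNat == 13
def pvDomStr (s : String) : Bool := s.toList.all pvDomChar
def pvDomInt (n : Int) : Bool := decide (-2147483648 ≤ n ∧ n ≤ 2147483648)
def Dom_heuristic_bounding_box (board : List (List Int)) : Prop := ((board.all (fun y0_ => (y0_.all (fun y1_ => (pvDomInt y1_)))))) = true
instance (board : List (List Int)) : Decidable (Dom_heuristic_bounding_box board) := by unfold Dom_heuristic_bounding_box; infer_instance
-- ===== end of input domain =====

-- B replaces A's two passes (collect the empty cells into a list, then re-scan that list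
-- for the bounding-box extrema) by a single pass over the board that maintains the count
-- and the four extrema directly (simpler: O(1) extra space, no intermediate list).

-- ===== PORT A =====
def heuristic_bounding_box (board : List (List Int)) : Int :=
  let empty_cells : List (Int × Int) :=
    (PySem.List.pyRange 0 (PySem.List.len board) 1).foldl (fun acc i =>
      (PySem.List.pyRange 0 (PySem.List.len (PySem.List.pyGetD board 0 [])) 1).foldl (fun acc j =>
        if PySem.List.pyGetD (PySem.List.pyGetD board i []) j 1 == 0 then acc ++ [(i, j)]
        else acc) acc) []
  if empty_cells = [] then 0
  else
    let h := empty_cells.headD (0, 0)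
    let s : Int × Int × Int × Int :=
      empty_cells.foldl (fun s p =>
        (if p.1 < s.1 then p.1 else s.1,
         if p.1 > s.2.1 then p.1 else s.2.1,
         if p.2 < s.2.2.1 then p.2 else s.2.2.1,
         if p.2 > s.2.2.2 then p.2 else s.2.2.2)) (h.1, h.1, h.2, h.2)
    let bounding_box_area := (s.2.1 - s.1 + 1) * (s.2.2.2 - s.2.2.1 + 1)
    bounding_box_area - PySem.List.len empty_cells

-- ===== PORT B =====
def heuristic_bounding_box_alt (board : List (List Int)) : Int :=
  let width : Int := if board.isEmpty then 0 else PySem.List.len (board.headD [])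
  let st : Int × Int × Int × Int × Int :=
    (PySem.List.enumerate board).foldl (fun s p =>
      (PySem.List.pyRange 0 width 1).foldl (fun s j =>
        if PySem.List.pyGetD p.2 j 1 == 0 then
          if s.1 = 0 then (1, p.1, p.1, j, j)
          else (s.1 + 1, s.2.1, p.1, min s.2.2.2.1 j, max s.2.2.2.2 j)
        else s) s) (0, 0, 0, 0, 0)
  if st.1 = 0 then 0
  else (st.2.2.1 - st.2.1 + 1) * (st.2.2.2.2 - st.2.2.2.1 + 1) - st.1

-- ===== PRECONDITION & SPEC =====
-- Pre_ excludes exactly the ragged boards on which the Python A raises IndexError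
-- (some row shorter than row 0; both A and B raise there).
def Pre_heuristic_bounding_box (board : List (List Int)) : Prop :=
  ∀ row ∈ board, (board.headD []).length ≤ row.length
instance (board : List (List Int)) : Decidable (Pre_heuristic_bounding_box board) := by
  unfold Pre_heuristic_bounding_box; infer_instance

def pvWitness_heuristic_bounding_box : List (List Int) := [[1, 0, 1], [1, 1, 0], [1, 1, 1]]

def Spec_heuristic_bounding_box (board : List (List Int)) (out : Int) : Prop := out = heuristic_bounding_box_alt board
instance (board : List (List Int)) (out : Int) : Decidable (Spec_heuristic_bounding_box board out) := by unfold Spec_heuristic_bounding_box; infer_instance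

-- ===== CLAIM (what is proved, stated in full; the proofs are below) =====
def Claim_equal_heuristic_bounding_box : Prop := ∀ (board : List (List Int)), Dom_heuristic_bounding_box board → Pre_heuristic_bounding_box board → Spec_heuristic_bounding_box board (heuristic_bounding_box board)

-- ===== LEMMAS AND PROOFS =====

-- A's min/max update step (the body of A's second fold)
def pvStepA (s : Int × Int × Int × Int) (p : Int × Int) : Int × Int × Int × Int :=
  (if p.1 < s.1 then p.1 else s.1,
   if p.1 > s.2.1 then p.1 else s.2.1,
   if p.2 < s.2.2.1 then p.2 else s.2.2.1,
   if p.2 > s.2.2.2 then p.2 else s.2.2.2)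

-- B's state update on one empty cell
def pvStepB (s : Int × Int × Int × Int × Int) (p : Int × Int) : Int × Int × Int × Int × Int :=
  if s.1 = 0 then (1, p.1, p.1, p.2, p.2)
  else (s.1 + 1, s.2.1, p.1, min s.2.2.2.1 p.2, max s.2.2.2.2 p.2)

-- the empty cells contributed by the row p.2 at row index p.1, in column order
def pvBlock (w : Int) (p : Int × List Int) : List (Int × Int) :=
  ((PySem.List.pyRange 0 w 1).filter (fun j => PySem.List.pyGetD p.2 j 1 == 0)).map (fun j => (p.1, j))

-- all empty cells, row-major
def pvCells (board : List (List Int)) (w : Int) : List (Int × Int) :=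
  (PySem.List.enumerate board).flatMap (pvBlock w)

lemma pvWidth_eq (board : List (List Int)) :
    PySem.List.len (PySem.List.pyGetD board 0 [])
      = (if board.isEmpty then 0 else PySem.List.len (board.headD [])) := by
  cases board <;> simp [PySem.List.pyGetD, PySem.List.pyGet?, PySem.List.pyIdx?, PySem.List.len]

lemma pvCells_eq_A (board : List (List Int)) :
    (PySem.List.pyRange 0 (PySem.List.len board) 1).foldl (fun acc i =>
      (PySem.List.pyRange 0 (PySem.List.len (PySem.List.pyGetD board 0 [])) 1).foldl (fun acc j =>
        if PySem.List.pyGetD (PySem.List.pyGetD board i []) j 1 == 0 then acc ++ [(i, j)]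
        else acc) acc) []
    = pvCells board (PySem.List.len (PySem.List.pyGetD board 0 [])) := by
  unfold pvCells pvBlock
  rw [PySem.List.enumerate_eq_map_pyRange board ([] : List Int), List.flatMap_map]
  have hinner : (fun (acc : List (Int × Int)) (i : Int) =>
      (PySem.List.pyRange 0 (PySem.List.len (PySem.List.pyGetD board 0 [])) 1).foldl (fun acc j =>
        if PySem.List.pyGetD (PySem.List.pyGetD board i []) j 1 == 0 then acc ++ [(i, j)]
        else acc) acc)
      = (fun acc i => acc ++
        ((PySem.List.pyRange 0 (PySem.List.len (PySem.List.pyGetD board 0 [])) 1).filter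
          (fun j => PySem.List.pyGetD (PySem.List.pyGetD board i []) j 1 == 0)).map (fun j => (i, j))) := by
    funext acc i
    rw [PySem.List.foldl_append_if]
  rw [hinner, PySem.List.foldl_append_eq_flatMap]
  simp [PySem.List.len]

lemma pvFold_eq_B (board : List (List Int)) (w : Int) (s : Int × Int × Int × Int × Int) :
    (PySem.List.enumerate board).foldl (fun s p =>
      (PySem.List.pyRange 0 w 1).foldl (fun s j =>
        if PySem.List.pyGetD p.2 j 1 == 0 then
          if s.1 = 0 then (1, p.1, p.1, j, j)
          else (s.1 + 1, s.2.1, p.1, min s.2.2.2.1 j, max s.2.2.2.2 j)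
        else s) s) s
    = (pvCells board w).foldl pvStepB s := by
  unfold pvCells
  rw [List.foldl_flatMap]
  have hstep : (fun (s : Int × Int × Int × Int × Int) (p : Int × List Int) =>
      (PySem.List.pyRange 0 w 1).foldl (fun s j =>
        if PySem.List.pyGetD p.2 j 1 == 0 then
          if s.1 = 0 then (1, p.1, p.1, j, j)
          else (s.1 + 1, s.2.1, p.1, min s.2.2.2.1 j, max s.2.2.2.2 j)
        else s) s)
      = (fun s p => (pvBlock w p).foldl pvStepB s) := by
    funext s p
    unfold pvBlock
    rw [List.foldl_map, List.foldl_filter]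
    rfl
  rw [hstep]

-- once started (count > 0), B's fold tracks exactly A's min/max fold
lemma pvFoldB_eq_foldA (l : List (Int × Int)) : ∀ (c minr maxr minc maxc : Int),
    0 < c →
    (∀ p ∈ l, minr ≤ p.1 ∧ maxr ≤ p.1) →
    l.Pairwise (fun a b => a.1 ≤ b.1) →
    l.foldl pvStepB (c, minr, maxr, minc, maxc)
      = (c + l.length, l.foldl pvStepA (minr, maxr, minc, maxc)) := by
  induction l with
  | nil => intro c minr maxr minc maxc _ _ _; simp
  | cons p t ih =>
    intro c minr maxr minc maxc hc hb hp
    obtain ⟨⟨h1, h2⟩, hb'⟩ := List.forall_mem_cons.mp hb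
    rw [List.pairwise_cons] at hp
    have hsB : pvStepB (c, minr, maxr, minc, maxc) p
        = (c + 1, minr, p.1, min minc p.2, max maxc p.2) := by
      simp [pvStepB, show ¬ c = 0 by omega]
    have hsA : pvStepA (minr, maxr, minc, maxc) p = (minr, p.1, min minc p.2, max maxc p.2) := by
      simp only [pvStepA, Prod.mk.injEq, Int.min_def, Int.max_def]
      refine ⟨?_, ?_, ?_, ?_⟩ <;> split_ifs <;> omega
    rw [List.foldl_cons, List.foldl_cons, hsB, hsA]
    rw [ih (c + 1) minr p.1 (min minc p.2) (max maxc p.2) (by omega)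
      (fun q hq => ⟨le_trans h1 (hp.1 q hq), hp.1 q hq⟩) hp.2]
    simp
    omega

-- row-major order: first components of pvCells are nondecreasing
lemma pvCells_pairwise (board : List (List Int)) (w : Int) :
    (pvCells board w).Pairwise (fun a b => a.1 ≤ b.1) := by
  unfold pvCells
  rw [List.pairwise_flatMap]
  constructor
  · intro p _
    unfold pvBlock
    rw [List.pairwise_map]
    exact List.pairwise_of_forall_sublist (fun {a b} _ => le_refl _)
  · refine (PySem.List.pairwise_lt_enumerate board 0).imp ?_
    intro a b hab x hx y hy
    unfold pvBlock at hx hy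
    obtain ⟨jx, _, rfl⟩ := List.mem_map.mp hx
    obtain ⟨jy, _, rfl⟩ := List.mem_map.mp hy
    exact le_of_lt hab

-- a fold of pvStepA starting at the head's own coordinates ignores the head
lemma pvStepA_head (e : Int × Int) :
    pvStepA (e.1, e.1, e.2, e.2) e = (e.1, e.1, e.2, e.2) := by
  simp only [pvStepA, Prod.mk.injEq]
  refine ⟨?_, ?_, ?_, ?_⟩ <;> split_ifs <;> omega

-- ===== VERDICT (by name: the statement is the Claim_ definition above) =====
theorem heuristic_bounding_box_spec : Claim_equal_heuristic_bounding_box := by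
  intro board _ _
  unfold Spec_heuristic_bounding_box heuristic_bounding_box heuristic_bounding_box_alt
  simp only []
  rw [pvCells_eq_A, pvWidth_eq, pvFold_eq_B]
  have hA : (fun (s : Int × Int × Int × Int) (p : Int × Int) =>
      (if p.1 < s.1 then p.1 else s.1,
       if p.1 > s.2.1 then p.1 else s.2.1,
       if p.2 < s.2.2.1 then p.2 else s.2.2.1,
       if p.2 > s.2.2.2 then p.2 else s.2.2.2)) = pvStepA := rfl
  rw [hA]
  set w : Int := if board.isEmpty then 0 else PySem.List.len (board.headD []) with hw
  rcases h : pvCells board w with _ | ⟨e, rest⟩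
  · simp
  · have hpw := pvCells_pairwise board w
    rw [h, List.pairwise_cons] at hpw
    have hfold := pvFoldB_eq_foldA rest 1 e.1 e.1 e.2 e.2 (by omega)
      (fun q hq => ⟨hpw.1 q hq, hpw.1 q hq⟩) hpw.2
    have hB0 : pvStepB (0, 0, 0, 0, 0) e = (1, e.1, e.1, e.2, e.2) := by simp [pvStepB]
    have hcnt : (1 : Int) + (rest.length : Int) ≠ 0 := by
      have : (0:Int) ≤ (rest.length : Int) := Int.natCast_nonneg _
      omega
    simp only [List.headD_cons, List.foldl_cons, pvStepA_head]
    rw [hB0, hfold]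
    simp [hcnt, PySem.List.len]
    ring
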